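-- pv_equiv track=rewrite | github.com/roshkov/Process-Mining | ex4_Conformance_checking_token_replay/main1_for_CJ.py | dependency_graph_file
-- ===== SOURCE A (Python) =====
-- def dependency_graph_file(log):
--     F = dict()
--     for caseid in log:
--         for i in range (0, len(log[caseid]) -1):
--             ai = log[caseid][i]["concept:name"]
--             aj = log[caseid][i+1]["concept:name"]
--
--             if ai not in F:
--                 F[ai] = dict()
--
--             if aj not in F[ai]:
--                 F[ai][aj] = 0
--
--             F[ai][aj] +=1
--
--     return F
-- ===== SOURCE B (Python) =====
-- def dependency_graph_file(log):
--     # phase 1: one flat table keyed by the transition pair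
--     flat = {}
--     for caseid in log:
--         trace = log[caseid]
--         for e1, e2 in zip(trace, trace[1:]):
--             key = (e1["concept:name"], e2["concept:name"])
--             flat[key] = flat.get(key, 0) + 1
--     # phase 2: reshape the flat table into the nested dict
--     F = {}
--     for (ai, aj), c in flat.items():
--         if ai not in F:
--             F[ai] = dict()
--         F[ai][aj] = c
--     return F
-- ===== Notes on version B (the rewrite author's own statement) =====
-- stated objective: alternative
-- what changed: B replaces A's single pass of nested conditional increments into a dict-of-dicts by a two-phase build: one pass accumulates a flat table keyed by the transition pair (ai, aj) over zipped consecutive events, then a separate second pass reshapes that flat table into the nested result dict; …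
-- outside the precondition, e.g. on dependency_graph_file({'c': [{'x': 'a'}, {'x': 'b'}]}): A raises KeyError, B raises KeyError
import Mathlib
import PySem

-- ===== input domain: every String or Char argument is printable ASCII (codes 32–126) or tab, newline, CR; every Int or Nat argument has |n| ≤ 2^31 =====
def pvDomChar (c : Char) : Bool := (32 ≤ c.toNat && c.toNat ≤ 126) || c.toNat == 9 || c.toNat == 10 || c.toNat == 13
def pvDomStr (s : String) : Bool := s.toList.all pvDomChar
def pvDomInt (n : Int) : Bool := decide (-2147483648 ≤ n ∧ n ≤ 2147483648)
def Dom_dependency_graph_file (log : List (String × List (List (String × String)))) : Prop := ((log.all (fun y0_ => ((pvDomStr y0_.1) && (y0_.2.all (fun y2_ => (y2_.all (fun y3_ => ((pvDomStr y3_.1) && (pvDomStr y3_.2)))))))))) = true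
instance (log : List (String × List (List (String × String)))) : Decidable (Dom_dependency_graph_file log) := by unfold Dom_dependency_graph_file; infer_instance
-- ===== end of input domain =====

-- B replaces A's single pass of nested conditional increments into a dict-of-dicts by a two-phase
-- build (flat pair-keyed counting table, then a separate reshape pass into the nested dict);
-- same cost, different decomposition.

-- ===== PORT A =====
def dependency_graph_file (log : List (String × List (List (String × String)))) : List (String × List (String × Int)) :=
  let F : PySem.Dict String (PySem.Dict String Int) :=
    log.foldl (fun F c =>
      let caseid := c.1
      (PySem.List.pyRange 0 ((((PySem.Dict.mk log).getD caseid []).length : Int) - 1)).foldl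
        (fun F i =>
          let trace := (PySem.Dict.mk log).getD caseid []
          let ai := (PySem.Dict.mk (PySem.List.pyGetD trace i [])).getD "concept:name" ""
          let aj := (PySem.Dict.mk (PySem.List.pyGetD trace (i + 1) [])).getD "concept:name" ""
          let F1 := if F.contains ai then F else F.insert ai PySem.Dict.empty
          let inner := F1.getD ai PySem.Dict.empty
          let inner1 := if inner.contains aj then inner else inner.insert aj 0
          F1.insert ai (inner1.insert aj (inner1.getD aj 0 + 1))) F)
      PySem.Dict.empty
  F.items.map (fun p => (p.1, p.2.items))

-- ===== PORT B =====
def dependency_graph_file_alt (log : List (String × List (List (String × String)))) : List (String × List (String × Int)) :=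
  let flat : PySem.Dict (String × String) Int :=
    log.foldl (fun flat c =>
      let trace := (PySem.Dict.mk log).getD c.1 []
      (trace.zip (PySem.List.slice trace (some 1))).foldl
        (fun flat e =>
          let key := ((PySem.Dict.mk e.1).getD "concept:name" "",
                      (PySem.Dict.mk e.2).getD "concept:name" "")
          flat.insert key (flat.getD key 0 + 1)) flat)
      PySem.Dict.empty
  let F : PySem.Dict String (PySem.Dict String Int) :=
    flat.items.foldl (fun F it =>
      let F1 := if F.contains it.1.1 then F else F.insert it.1.1 PySem.Dict.empty
      F1.insert it.1.1 ((F1.getD it.1.1 PySem.Dict.empty).insert it.1.2 it.2))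
      PySem.Dict.empty
  F.items.map (fun p => (p.1, p.2.items))

-- ===== PRECONDITION & SPEC =====
-- Pre_ excludes inputs whose Python-dict reading is ambiguous or on which A raises: duplicate case
-- ids (the dict keeps only the last trace for the id), and, in traces with at least two events,
-- events that do not carry exactly one "concept:name" key (a missing key makes A raise KeyError,
-- a duplicated key keeps only its last value in the dict).
def Pre_dependency_graph_file (log : List (String × List (List (String × String)))) : Prop :=
  (log.map (·.1)).Nodup ∧
  ∀ p ∈ log, 2 ≤ p.2.length → ∀ ev ∈ p.2, (ev.map (·.1)).count "concept:name" = 1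
instance (log : List (String × List (List (String × String)))) : Decidable (Pre_dependency_graph_file log) := by unfold Pre_dependency_graph_file; infer_instance

def pvWitness_dependency_graph_file : (List (String × List (List (String × String)))) :=
  [("c1", [[("concept:name", "a")], [("concept:name", "b")], [("concept:name", "a")]]),
   ("c2", [[("concept:name", "a")], [("concept:name", "b")]])]

def Spec_dependency_graph_file (log : List (String × List (List (String × String)))) (out : List (String × List (String × Int))) : Prop := out = dependency_graph_file_alt log
instance (log : List (String × List (List (String × String)))) (out : List (String × List (String × Int))) : Decidable (Spec_dependency_graph_file log out) := by unfold Spec_dependency_graph_file; infer_instance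

-- ===== CLAIM (what is proved, stated in full; the proofs are below) =====
def Claim_equal_dependency_graph_file : Prop := ∀ (log : List (String × List (List (String × String)))), Dom_dependency_graph_file log → Pre_dependency_graph_file log → Spec_dependency_graph_file log (dependency_graph_file log)

-- ===== LEMMAS AND PROOFS =====

-- the name of an event, and the list of consecutive transition pairs of a trace
def pvName (ev : List (String × String)) : String := (PySem.Dict.mk ev).getD "concept:name" ""
def pvPairs (trace : List (List (String × String))) : List (String × String) :=
  (trace.zip (trace.drop 1)).map (fun e => (pvName e.1, pvName e.2))
-- A's loop body and B's reshape body, in simplified one-insert form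
def pvStepA (F : PySem.Dict String (PySem.Dict String Int)) (p : String × String) :
    PySem.Dict String (PySem.Dict String Int) :=
  F.insert p.1 ((F.getD p.1 PySem.Dict.empty).insert p.2
    ((F.getD p.1 PySem.Dict.empty).getD p.2 0 + 1))
def pvStep2 (F : PySem.Dict String (PySem.Dict String Int)) (it : (String × String) × Int) :
    PySem.Dict String (PySem.Dict String Int) :=
  F.insert it.1.1 ((F.getD it.1.1 PySem.Dict.empty).insert it.1.2 it.2)
-- the items of the flat counter of a pair list
def pvL (ps : List (String × String)) : List ((String × String) × Int) :=
  (PySem.Set.ofList ps).map (fun k => (k, (ps.count k : Int)))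

theorem pvStepA_raw (F : PySem.Dict String (PySem.Dict String Int)) (ai aj : String) :
    (let F1 := if F.contains ai then F else F.insert ai PySem.Dict.empty
     let inner := F1.getD ai PySem.Dict.empty
     let inner1 := if inner.contains aj then inner else inner.insert aj 0
     F1.insert ai (inner1.insert aj (inner1.getD aj 0 + 1))) = pvStepA F (ai, aj) := by
  simp only [pvStepA]
  by_cases h1 : F.contains ai
  · simp only [h1, if_true]
    by_cases h2 : (F.getD ai PySem.Dict.empty).contains aj
    · simp [h2]
    · rw [if_neg h2, PySem.Dict.getD_insert_self, PySem.Dict.insert_insert_self,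
          PySem.Dict.getD_of_not_contains _ _ (eq_false_of_ne_true h2)]
  · rw [if_neg h1, PySem.Dict.getD_insert_self]
    rw [if_neg (by simp [PySem.Dict.contains_empty])]
    rw [PySem.Dict.insert_insert_self, PySem.Dict.insert_insert_self,
      PySem.Dict.getD_of_not_contains _ _ (eq_false_of_ne_true h1), PySem.Dict.getD_empty,
      PySem.Dict.getD_insert_self]

theorem pvStep2_raw (F : PySem.Dict String (PySem.Dict String Int)) (it : (String × String) × Int) :
    (let F1 := if F.contains it.1.1 then F else F.insert it.1.1 PySem.Dict.empty
     F1.insert it.1.1 ((F1.getD it.1.1 PySem.Dict.empty).insert it.1.2 it.2)) = pvStep2 F it := by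
  simp only [pvStep2]
  by_cases h1 : F.contains it.1.1
  · simp [h1]
  · rw [if_neg h1, PySem.Dict.getD_insert_self, PySem.Dict.insert_insert_self,
      PySem.Dict.getD_of_not_contains _ _ (eq_false_of_ne_true h1)]

-- two inserts at distinct keys commute when the first key is already present
theorem pvInsert_comm {κ ν : Type} [BEq κ] [LawfulBEq κ] (d : PySem.Dict κ ν) {k k' : κ}
    (v w : ν) (hk : d.contains k = true) (hne : k' ≠ k) :
    (d.insert k v).insert k' w = (d.insert k' w).insert k v := by
  apply PySem.Dict.ext
  by_cases hk' : d.contains k' = true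
  · rw [PySem.Dict.items_insert_of_contains _ w
        (by simp [PySem.Dict.contains_insert, hk']),
      PySem.Dict.items_insert_of_contains _ v hk,
      PySem.Dict.items_insert_of_contains _ v
        (by simp [PySem.Dict.contains_insert, hk]),
      PySem.Dict.items_insert_of_contains _ w hk',
      List.map_map, List.map_map]
    apply List.map_congr_left
    intro p _
    simp only [Function.comp_apply]
    by_cases h1 : p.1 = k <;> by_cases h2 : p.1 = k' <;>
      simp_all
  · have hck' : (d.insert k v).contains k' = false := by
      simp [PySem.Dict.contains_insert, hk', hne]
    have hck : (d.insert k' w).contains k = true := by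
      simp [PySem.Dict.contains_insert, hk]
    rw [PySem.Dict.items_insert_of_not_contains _ w hck',
      PySem.Dict.items_insert_of_contains _ v hk,
      PySem.Dict.items_insert_of_contains _ v hck,
      PySem.Dict.items_insert_of_not_contains _ w (eq_false_of_ne_true hk'),
      List.map_append]
    simp [hne]

-- overwriting at the same pair key collapses
theorem pvStep2_collapse (F : PySem.Dict String (PySem.Dict String Int))
    (k : String × String) (c v : Int) :
    pvStep2 (pvStep2 F (k, c)) (k, v) = pvStep2 F (k, v) := by
  simp only [pvStep2, PySem.Dict.getD_insert_self, PySem.Dict.insert_insert_self]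

-- one reshape step at a key different from p commutes with the overwrite at p
theorem pvStep2_comm (G : PySem.Dict String (PySem.Dict String Int))
    (p : String × String) (v : Int) (r : (String × String) × Int) (hne : r.1 ≠ p)
    (h1 : G.contains p.1 = true) (h2 : (G.getD p.1 PySem.Dict.empty).contains p.2 = true) :
    pvStep2 (pvStep2 G (p, v)) r = pvStep2 (pvStep2 G r) (p, v) := by
  obtain ⟨⟨ai, aj⟩, hp⟩ : ∃ q, p = q := ⟨p, rfl⟩
  obtain ⟨⟨⟨bi, bj⟩, d⟩, hr⟩ : ∃ q, r = q := ⟨r, rfl⟩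
  subst hp hr
  simp only [pvStep2] at *
  by_cases hbi : bi = ai
  · subst hbi
    have hbj : bj ≠ aj := by
      intro h; exact hne (by simp [h])
    rw [PySem.Dict.getD_insert_self, PySem.Dict.getD_insert_self,
        PySem.Dict.insert_insert_self, PySem.Dict.insert_insert_self,
        pvInsert_comm _ _ _ h2 hbj]
  · rw [PySem.Dict.getD_insert (k' := bi), if_neg hbi,
        PySem.Dict.getD_insert (k' := ai), if_neg (Ne.symm hbi)]
    exact pvInsert_comm _ _ _ h1 hbi

-- the overwrite at p commutes past a whole reshape fold that never touches p
theorem pvStep2_fold_comm (rest : List ((String × String) × Int))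
    (G : PySem.Dict String (PySem.Dict String Int)) (p : String × String) (v : Int)
    (hrest : ∀ q ∈ rest, q.1 ≠ p)
    (h1 : G.contains p.1 = true) (h2 : (G.getD p.1 PySem.Dict.empty).contains p.2 = true) :
    rest.foldl pvStep2 (pvStep2 G (p, v)) = pvStep2 (rest.foldl pvStep2 G) (p, v) := by
  induction rest generalizing G with
  | nil => rfl
  | cons r rest ih =>
    simp only [List.foldl_cons]
    rw [pvStep2_comm G p v r (hrest r (by simp)) h1 h2]
    apply ih _ (fun q hq => hrest q (by simp [hq]))
    · -- contains p.1 preserved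
      simp only [pvStep2, PySem.Dict.contains_insert]
      simp [h1]
    · -- inner contains p.2 preserved
      by_cases hbi : r.1.1 = p.1
      · simp only [pvStep2, hbi, PySem.Dict.getD_insert_self]
        have hbj : r.1.2 ≠ p.2 := by
          intro h
          exact hrest r (by simp) (by
            cases r with
            | mk k c => cases k with
              | mk a b =>
                cases p with
                | mk x y => simp_all)
        simp [PySem.Dict.contains_insert, h2]
      · simp only [pvStep2]
        rw [PySem.Dict.getD_insert, if_neg (Ne.symm hbi)]
        exact h2

-- reshaping a value-updated flat table = reshaping, then one overwrite step
theorem pvReshape_update (xs : List ((String × String) × Int)) (p : String × String) (v : Int)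
    (hnd : (xs.map (·.1)).Nodup) (hmem : p ∈ xs.map (·.1))
    (F : PySem.Dict String (PySem.Dict String Int)) :
    (xs.map (fun q => if q.1 = p then (p, v) else q)).foldl pvStep2 F =
      pvStep2 (xs.foldl pvStep2 F) (p, v) := by
  induction xs generalizing F with
  | nil => simp at hmem
  | cons q rest ih =>
    simp only [List.map_cons, List.nodup_cons, List.map_cons] at hnd ⊢
    by_cases hq : q.1 = p
    · -- p is the head key; rest never mentions p
      have hrest : ∀ r ∈ rest, r.1 ≠ p := by
        intro r hr h
        exact hnd.1 (hq ▸ h ▸ (List.mem_map_of_mem hr))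
      have hrw : rest.map (fun q => if q.1 = p then (p, v) else q) = rest := by
        conv_rhs => rw [← List.map_id rest]
        apply List.map_congr_left
        intro r hr
        simp [if_neg (hrest r hr)]
      simp only [List.foldl_cons, if_pos hq]
      rw [hrw]
      have hcol : pvStep2 F (p, v) = pvStep2 (pvStep2 F q) (p, v) := by
        obtain ⟨k, c⟩ := q
        simp only at hq
        subst hq
        exact (pvStep2_collapse F k c v).symm
      rw [hcol]
      exact pvStep2_fold_comm rest (pvStep2 F q) p v hrest
        (by subst hq; simp [pvStep2])
        (by
          obtain ⟨k, c⟩ := q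
          simp only at hq; subst hq
          simp [pvStep2, PySem.Dict.getD_insert_self, PySem.Dict.contains_insert_self])
    · have hmem' : p ∈ rest.map (·.1) := by
        rcases List.mem_cons.mp hmem with h | h
        · exact absurd h.symm hq
        · exact h
      simp only [List.foldl_cons, if_neg hq]
      exact ih hnd.2 hmem' (pvStep2 F q)

-- lookup in A's accumulated nested dict counts the pair's occurrences
theorem pvLK (ps : List (String × String)) (ai aj : String) :
    ((ps.foldl pvStepA PySem.Dict.empty).getD ai PySem.Dict.empty).getD aj 0 =
      (ps.count (ai, aj) : Int) := by
  induction ps using List.reverseRecOn with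
  | nil => simp [PySem.Dict.getD_empty]
  | append_singleton ps p ih =>
    obtain ⟨pi, pj⟩ := p
    rw [List.foldl_append]
    simp only [List.foldl_cons, List.foldl_nil, pvStepA, List.count_append]
    by_cases h1 : ai = pi
    · subst h1
      rw [PySem.Dict.getD_insert_self]
      by_cases h2 : aj = pj
      · subst h2
        rw [PySem.Dict.getD_insert_self, ih]
        simp
      · rw [PySem.Dict.getD_insert (k' := aj), if_neg h2, ih]
        simp [Ne.symm h2]
    · rw [PySem.Dict.getD_insert (k' := ai), if_neg h1, ih]
      have : ((pi, pj) : String × String) ≠ (ai, aj) := by simp [Ne.symm h1]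
      simp [this]

-- MAIN: A's nested increment fold equals the reshape of the flat counter
theorem pvL_keys (ps : List (String × String)) :
    (pvL ps).map (·.1) = PySem.Set.ofList ps := by
  simp [pvL, List.map_map, Function.comp_def]

theorem pvMain (ps : List (String × String)) :
    ps.foldl pvStepA PySem.Dict.empty = (pvL ps).foldl pvStep2 PySem.Dict.empty := by
  induction ps using List.reverseRecOn with
  | nil => rfl
  | append_singleton ps p ih =>
    have hlk := pvLK ps p.1 p.2
    rw [ih] at hlk
    rw [List.foldl_append, List.foldl_cons, List.foldl_nil, ih]
    by_cases hp : p ∈ ps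
    · have hL : pvL (ps ++ [p]) =
          (pvL ps).map (fun q => if q.1 = p then (p, (ps.count p : Int) + 1) else q) := by
        unfold pvL
        rw [PySem.Set.ofList_append]
        simp only [PySem.Set.update, List.foldl_cons, List.foldl_nil]
        rw [PySem.Set.add_of_mem (by rw [PySem.Set.mem_ofList]; exact hp)]
        rw [List.map_map]
        apply List.map_congr_left
        intro k _
        simp only [Function.comp_apply]
        by_cases hk : k = p
        · subst hk
          simp [List.count_append]
        · rw [if_neg hk]
          have : ¬ (p == k) = true := by simp [Ne.symm hk]
          simp [List.count_append, List.count_cons, this]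
      rw [hL, pvReshape_update _ _ _
            (by rw [pvL_keys]; exact PySem.Set.nodup_ofList ps)
            (by rw [pvL_keys, PySem.Set.mem_ofList]; exact hp)]
      simp only [pvStepA, pvStep2]
      rw [hlk]
    · have hc0 : ps.count p = 0 := List.count_eq_zero_of_not_mem hp
      have hL : pvL (ps ++ [p]) = pvL ps ++ [(p, 1)] := by
        unfold pvL
        rw [PySem.Set.ofList_append]
        simp only [PySem.Set.update, List.foldl_cons, List.foldl_nil]
        rw [PySem.Set.add_of_not_mem (by rw [PySem.Set.mem_ofList]; exact hp)]
        rw [List.map_append]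
        congr 1
        · apply List.map_congr_left
          intro k hk
          have hkp : ¬ (p == k) = true := by
            simp only [beq_iff_eq]
            intro h
            rw [← h] at hk
            exact hp ((PySem.Set.mem_ofList ps p).mp hk)
          simp [List.count_append, List.count_cons, hkp]
        · simp [List.count_append, hc0]
      rw [hL, List.foldl_append, List.foldl_cons, List.foldl_nil]
      simp only [pvStepA, pvStep2]
      rw [hlk, hc0]
      norm_num

-- the index loop over a trace produces exactly the zipped consecutive pairs
theorem pvIndexNat (u : List (List (String × String))) :
    ∀ x, (List.range u.length).map
      (fun i => ((x :: u).getD i [], u.getD i [])) = (x :: u).zip u := by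
  induction u with
  | nil => intro x; simp
  | cons y u ih =>
    intro x
    rw [List.length_cons, List.range_succ_eq_map, List.map_cons, List.map_map]
    simp only [List.getD_cons_zero, List.zip_cons_cons]
    congr 1
    rw [show ((fun i => ((x :: y :: u).getD i [], (y :: u).getD i [])) ∘ Nat.succ) =
        (fun i => ((y :: u).getD i [], u.getD i [])) from by
      funext i; simp]
    exact ih y

theorem pvIndexPairs (trace : List (List (String × String))) :
    (PySem.List.pyRange 0 ((trace.length : Int) - 1)).map
        (fun i => (PySem.List.pyGetD trace i [], PySem.List.pyGetD trace (i + 1) [])) =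
      trace.zip (trace.drop 1) := by
  cases trace with
  | nil => rfl
  | cons x u =>
    rw [show ((((x :: u).length : Nat) : Int) - 1) = ((u.length : Nat) : Int) by
      push_cast [List.length_cons]; ring]
    rw [PySem.List.pyRange_zero_natCast, List.map_map]
    rw [List.drop_one, List.tail_cons]
    rw [← pvIndexNat u x]
    apply List.map_congr_left
    intro k _
    simp only [Function.comp_apply, PySem.List.pyGetD_natCast]
    congr 1
    rw [show ((k : Int) + 1) = ((k + 1 : Nat) : Int) by push_cast; ring,
      PySem.List.pyGetD_natCast]
    simp

-- under Pre_, A's port is the pvStepA fold over the flattened pair stream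
theorem pvA_norm (log : List (String × List (List (String × String))))
    (hnd : (log.map (·.1)).Nodup) :
    dependency_graph_file log =
      (((log.flatMap (fun c => pvPairs c.2)).foldl pvStepA PySem.Dict.empty).items.map
        (fun p => (p.1, p.2.items))) := by
  simp only [dependency_graph_file]
  congr 1
  rw [List.foldl_flatMap]
  congr 1
  apply PySem.List.foldl_congr_mem
  intro F c hc
  have hget : (PySem.Dict.mk log).getD c.1 [] = c.2 :=
    PySem.Dict.getD_of_mem_items (PySem.Dict.mk log) (by simpa using hc) (by simpa using hnd) []
  rw [hget]
  have hbody : ∀ (F : PySem.Dict String (PySem.Dict String Int)) (i : Int),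
      (let trace := c.2
       let ai := (PySem.Dict.mk (PySem.List.pyGetD trace i [])).getD "concept:name" ""
       let aj := (PySem.Dict.mk (PySem.List.pyGetD trace (i + 1) [])).getD "concept:name" ""
       let F1 := if F.contains ai then F else F.insert ai PySem.Dict.empty
       let inner := F1.getD ai PySem.Dict.empty
       let inner1 := if inner.contains aj then inner else inner.insert aj 0
       F1.insert ai (inner1.insert aj (inner1.getD aj 0 + 1))) =
      pvStepA F (pvName (PySem.List.pyGetD c.2 i []), pvName (PySem.List.pyGetD c.2 (i + 1) [])) := by
    intro F i
    exact pvStepA_raw F _ _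
  calc (PySem.List.pyRange 0 (((c.2).length : Int) - 1)).foldl
        (fun F i =>
          let trace := c.2
          let ai := (PySem.Dict.mk (PySem.List.pyGetD trace i [])).getD "concept:name" ""
          let aj := (PySem.Dict.mk (PySem.List.pyGetD trace (i + 1) [])).getD "concept:name" ""
          let F1 := if F.contains ai then F else F.insert ai PySem.Dict.empty
          let inner := F1.getD ai PySem.Dict.empty
          let inner1 := if inner.contains aj then inner else inner.insert aj 0
          F1.insert ai (inner1.insert aj (inner1.getD aj 0 + 1))) F
      = (PySem.List.pyRange 0 (((c.2).length : Int) - 1)).foldl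
          (fun F i => pvStepA F (pvName (PySem.List.pyGetD c.2 i []),
            pvName (PySem.List.pyGetD c.2 (i + 1) []))) F := by
        apply PySem.List.foldl_congr_mem
        intro acc i _
        exact hbody acc i
    _ = (pvPairs c.2).foldl pvStepA F := by
        rw [pvPairs, ← pvIndexPairs c.2, List.map_map, List.foldl_map]
        rfl

-- under Pre_, B's port is the reshape of the flat counter of the same pair stream
theorem pvB_norm (log : List (String × List (List (String × String))))
    (hnd : (log.map (·.1)).Nodup) :
    dependency_graph_file_alt log =
      (((pvL (log.flatMap (fun c => pvPairs c.2))).foldl pvStep2 PySem.Dict.empty).items.map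
        (fun p => (p.1, p.2.items))) := by
  simp only [dependency_graph_file_alt]
  have hflat : (log.foldl (fun flat c =>
      ((((PySem.Dict.mk log).getD c.1 []).zip
          (PySem.List.slice ((PySem.Dict.mk log).getD c.1 []) (some 1))).foldl
        (fun flat e =>
          flat.insert ((PySem.Dict.mk e.1).getD "concept:name" "",
              (PySem.Dict.mk e.2).getD "concept:name" "")
            (flat.getD ((PySem.Dict.mk e.1).getD "concept:name" "",
              (PySem.Dict.mk e.2).getD "concept:name" "") 0 + 1)) flat))
      (PySem.Dict.empty : PySem.Dict (String × String) Int)) =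
      PySem.Dict.counter (log.flatMap (fun c => pvPairs c.2)) := by
    rw [← PySem.Dict.foldl_insert_getD_add_one_eq_counter, List.foldl_flatMap]
    apply PySem.List.foldl_congr_mem
    intro flat c hc
    have hget : (PySem.Dict.mk log).getD c.1 [] = c.2 :=
      PySem.Dict.getD_of_mem_items (PySem.Dict.mk log) (by simpa using hc) (by simpa using hnd) []
    rw [hget, PySem.List.slice_from c.2 (by norm_num : (0:Int) ≤ 1)]
    rw [show ((1:Int).toNat) = 1 from rfl]
    rw [pvPairs, List.foldl_map]
    rfl
  rw [hflat, PySem.Dict.items_counter]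
  congr 2
  rw [show ((PySem.Set.ofList (log.flatMap (fun c => pvPairs c.2))).map
      (fun k => (k, ((log.flatMap (fun c => pvPairs c.2)).count k : Int)))) =
      pvL (log.flatMap (fun c => pvPairs c.2)) from rfl]
  apply PySem.List.foldl_congr_mem
  intro F it _
  exact pvStep2_raw F it

-- ===== VERDICT (by name: the statement is the Claim_ definition above) =====
theorem dependency_graph_file_spec : Claim_equal_dependency_graph_file := by
  intro log _ hpre
  unfold Spec_dependency_graph_file
  rw [pvA_norm log hpre.1, pvB_norm log hpre.1, pvMain]
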